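-- pv_equiv track=rewrite | github.com/JuanHenao31/mincaai | backend_api/app/services/excel_service.py | find_segments
-- ===== SOURCE A (Python) =====
-- from typing import List, Optional
--
-- def find_segments(non_null_counts: List[int],
--                   min_non_null: int = 2,
--                   min_rows: int = 2) -> List[tuple]:
--     """Find contiguous segments (inclusive ranges) where rows have at least `min_non_null` non-empty cells.
--
--     Returns a list of (start_idx, end_idx) pairs.
--     """
--     good = [i for i, c in enumerate(non_null_counts) if c >= min_non_null]
--     if not good:
--         return []
--     segs = []
--     start = prev = good[0]
--     for r in good[1:]:
--         if r == prev + 1: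
--             prev = r
--         else:
--             if prev - start + 1 >= min_rows:
--                 segs.append((start, prev))
--             start = prev = r
--     if prev - start + 1 >= min_rows:
--         segs.append((start, prev))
--     return segs
-- ===== SOURCE B (Python) =====
-- def find_segments(non_null_counts, min_non_null=2, min_rows=2):
--     """Single pass: maintain the current run of good rows directly, no index list."""
--     segs = []
--     start = end = None
--     for i, c in enumerate(non_null_counts):
--         if c >= min_non_null:
--             if start is None:
--                 start = i
--             end = i
--         else:
--             if start is not None:
--                 if end - start + 1 >= min_rows:
--                     segs.append((start, end))
--                 start = end = None
--     if start is not None and end - start + 1 >= min_rows: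
--         segs.append((start, end))
--     return segs
-- ===== Notes on version B (the rewrite author's own statement) =====
-- stated objective: simpler
-- what changed: Drops A's intermediate list of good indices and its gap-detection loop; B does one pass over the counts themselves, maintaining the current run as start/end and flushing it on the first bad row or at end of input.
import Mathlib
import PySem

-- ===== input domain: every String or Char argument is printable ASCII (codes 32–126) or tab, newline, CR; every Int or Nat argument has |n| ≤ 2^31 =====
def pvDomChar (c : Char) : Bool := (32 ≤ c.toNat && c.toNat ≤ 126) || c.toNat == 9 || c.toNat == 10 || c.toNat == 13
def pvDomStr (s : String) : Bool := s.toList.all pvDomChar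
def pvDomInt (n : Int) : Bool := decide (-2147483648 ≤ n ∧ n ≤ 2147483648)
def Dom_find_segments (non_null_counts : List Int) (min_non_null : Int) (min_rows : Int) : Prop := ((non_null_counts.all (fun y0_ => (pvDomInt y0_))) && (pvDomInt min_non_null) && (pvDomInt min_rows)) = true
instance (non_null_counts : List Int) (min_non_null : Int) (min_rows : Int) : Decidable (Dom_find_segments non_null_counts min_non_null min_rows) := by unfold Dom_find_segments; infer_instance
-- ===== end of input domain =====

-- B replaces A's good-index list + gap loop by one pass keeping the current run's start/end (objective: simpler).

-- ===== PORT A =====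
-- the comprehension `[i for i, c in enumerate(non_null_counts) if c >= min_non_null]`
def fsGood (min_non_null : Int) : List Int → Int → List Int
  | [], _ => []
  | c :: cs, i =>
    if c ≥ min_non_null then i :: fsGood min_non_null cs (i + 1)
    else fsGood min_non_null cs (i + 1)

-- A's `for r in good[1:]` loop, followed by the final flush (the `[]` case)
def fsRun (min_rows : Int) : List Int → List (Int × Int) → Int → Int → List (Int × Int)
  | [], segs, start, prev =>
    if prev - start + 1 ≥ min_rows then segs ++ [(start, prev)] else segs
  | r :: rest, segs, start, prev =>
    if r = prev + 1 then fsRun min_rows rest segs start r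
    else fsRun min_rows rest
      (if prev - start + 1 ≥ min_rows then segs ++ [(start, prev)] else segs) r r

def find_segments (non_null_counts : List Int) (min_non_null : Int) (min_rows : Int) : List (Int × Int) :=
  match fsGood min_non_null non_null_counts 0 with
  | [] => []
  | g :: rest => fsRun min_rows rest [] g g

-- ===== PORT B =====
-- B's `for i, c in enumerate(...)` loop; `run = some (start, end)` is B's non-None start/end pair,
-- and the `[]` case is B's flush after the loop.
def fsLoop (min_non_null min_rows : Int) :
    List Int → Int → List (Int × Int) → Option (Int × Int) → List (Int × Int)
  | [], _, segs, run =>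
    match run with
    | none => segs
    | some (s, e) => if e - s + 1 ≥ min_rows then segs ++ [(s, e)] else segs
  | c :: cs, i, segs, run =>
    if c ≥ min_non_null then
      match run with
      | none => fsLoop min_non_null min_rows cs (i + 1) segs (some (i, i))
      | some (s, _) => fsLoop min_non_null min_rows cs (i + 1) segs (some (s, i))
    else
      match run with
      | none => fsLoop min_non_null min_rows cs (i + 1) segs none
      | some (s, e) =>
        fsLoop min_non_null min_rows cs (i + 1)
          (if e - s + 1 ≥ min_rows then segs ++ [(s, e)] else segs) none

def find_segments_alt (non_null_counts : List Int) (min_non_null : Int) (min_rows : Int) : List (Int × Int) :=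
  fsLoop min_non_null min_rows non_null_counts 0 [] none

-- ===== PRECONDITION & SPEC =====
def Spec_find_segments (non_null_counts : List Int) (min_non_null : Int) (min_rows : Int) (out : List (Int × Int)) : Prop := out = find_segments_alt non_null_counts min_non_null min_rows
instance (non_null_counts : List Int) (min_non_null : Int) (min_rows : Int) (out : List (Int × Int)) : Decidable (Spec_find_segments non_null_counts min_non_null min_rows out) := by unfold Spec_find_segments; infer_instance

-- ===== CLAIM (what is proved, stated in full; the proofs are below) =====
def Claim_equal_find_segments : Prop := ∀ (non_null_counts : List Int) (min_non_null : Int) (min_rows : Int), Dom_find_segments non_null_counts min_non_null min_rows → Spec_find_segments non_null_counts min_non_null min_rows (find_segments non_null_counts min_non_null min_rows)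

-- ===== LEMMAS AND PROOFS =====

-- the first good index found from position j is at least j
theorem fsGood_head_ge (mn : Int) :
    ∀ (cs : List Int) (j g : Int) (rest : List Int),
      fsGood mn cs j = g :: rest → j ≤ g := by
  intro cs
  induction cs with
  | nil => intro j g rest h; simp [fsGood] at h
  | cons c cs ih =>
    intro j g rest h
    by_cases hc : c ≥ mn
    · simp [fsGood, hc] at h
      omega
    · simp [fsGood, hc] at h
      have := ih (j + 1) g rest h
      omega

-- B's loop simulates A's loop over the good-index list:
-- with an active run (s, e) at position i = e + 1 it is A's loop mid-run,
-- with no active run it is A's "find the next segment start" state.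
theorem fsLoop_eq_fsRun (mn mr : Int) :
    ∀ (cs : List Int) (i : Int) (segs : List (Int × Int)),
      (∀ s e, e + 1 = i →
        fsLoop mn mr cs i segs (some (s, e)) = fsRun mr (fsGood mn cs i) segs s e) ∧
      (fsLoop mn mr cs i segs none =
        match fsGood mn cs i with
        | [] => segs
        | g :: rest => fsRun mr rest segs g g) := by
  intro cs
  induction cs with
  | nil =>
    intro i segs
    constructor
    · intro s e _; simp [fsLoop, fsGood, fsRun]
    · simp [fsLoop, fsGood]
  | cons c cs ih =>
    intro i segs
    constructor
    · intro s e he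
      by_cases hc : c ≥ mn
      · -- good row: run continues; A sees the contiguous index i = e + 1
        have hr : (i : Int) = e + 1 := by omega
        simp only [fsLoop, if_pos hc]
        rw [(ih (i + 1) segs).1 s i rfl]
        simp [fsGood, hc, fsRun, hr]
      · -- bad row: B flushes now; A's next good index (if any) is ≥ i + 1, so it also flushes
        simp only [fsLoop, if_neg hc]
        rw [(ih (i + 1) (if e - s + 1 ≥ mr then segs ++ [(s, e)] else segs)).2]
        simp only [fsGood, if_neg hc]
        cases hg : fsGood mn cs (i + 1) with
        | nil => simp [fsRun]
        | cons g rest =>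
          have hge := fsGood_head_ge mn cs (i + 1) g rest hg
          have hne : ¬ (g = e + 1) := by omega
          simp [fsRun, hne]
    · by_cases hc : c ≥ mn
      · -- first good row of a new run: B opens run (i, i); A starts with start = prev = i
        simp only [fsLoop, if_pos hc, fsGood]
        rw [(ih (i + 1) segs).1 i i rfl]
      · simp only [fsLoop, if_neg hc, fsGood]
        rw [(ih (i + 1) segs).2]

-- ===== VERDICT (by name: the statement is the Claim_ definition above) =====
theorem find_segments_spec : Claim_equal_find_segments := by
  intro xs mn mr _
  unfold Spec_find_segments find_segments find_segments_alt
  rw [(fsLoop_eq_fsRun mn mr xs 0 []).2]
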